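-- pv_equiv track=rewrite | github.com/minho-sa/automation-sa | app/services/recommendation/check/ec2/utils.py | get_new_generation_equivalent
-- ===== SOURCE A (Python) =====
-- def get_new_generation_equivalent(instance_type):
--     """새로운 세대 인스턴스 타입 매핑"""
--     mapping = {
--         't2.': 't3.',
--         'm4.': 'm5.',
--         'c4.': 'c5.',
--         'r4.': 'r5.'
--     }
--     for old, new in mapping.items():
--         if instance_type.startswith(old):
--             return instance_type.replace(old, new)
--     return instance_type
-- ===== SOURCE B (Python) =====
-- def get_new_generation_equivalent(instance_type):
--     """새로운 세대 인스턴스 타입 매핑"""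
--     # Table-free: each upgradable family prefix is 'X<digit>.' where X/digit is
--     # t2, m4, c4 or r4; the new generation is the same letter with the digit
--     # bumped by one, computed arithmetically instead of looked up.
--     if len(instance_type) >= 3 and instance_type[2] == '.':
--         f = instance_type[0]
--         g = instance_type[1]
--         if (f == 't' and g == '2') or (f in 'mcr' and g == '4'):
--             old = f + g + '.'
--             new = f + chr(ord(g) + 1) + '.'
--             return instance_type.replace(old, new)
--     return instance_type
-- ===== Notes on version B (the rewrite author's own statement) =====
-- stated objective: alternative
-- what changed: Drops the mapping table and the scan over its items entirely: B inspects the first three characters, recognizes the upgradable family pattern letter-digit-dot (t2/m4/c4/r4) with character tests, and computes the new prefix arithmetically by bumping the generation digit with chr(ord(g)+1).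
import Mathlib
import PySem

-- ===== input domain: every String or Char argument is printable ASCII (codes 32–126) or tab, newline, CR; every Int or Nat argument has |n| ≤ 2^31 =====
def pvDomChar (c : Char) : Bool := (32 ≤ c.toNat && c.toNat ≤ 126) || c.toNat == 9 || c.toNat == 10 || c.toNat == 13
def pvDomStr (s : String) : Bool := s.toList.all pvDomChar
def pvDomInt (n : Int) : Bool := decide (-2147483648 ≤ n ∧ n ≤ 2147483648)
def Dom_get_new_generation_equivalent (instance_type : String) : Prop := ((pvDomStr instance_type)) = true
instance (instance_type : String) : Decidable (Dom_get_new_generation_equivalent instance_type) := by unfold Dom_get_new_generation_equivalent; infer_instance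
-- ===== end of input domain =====

-- B drops A's mapping table and item scan: it pattern-matches the first three characters
-- (letter-digit-dot with the pairs t2,m4,c4,r4) and computes the new prefix by bumping the
-- digit arithmetically (chr(ord(g)+1)) — an alternative, table-free algorithm.


-- ===== PORT A =====
-- the dict literal of A, as its insertion-ordered item list
def gngeMapping : List (String × String) :=
  [("t2.", "t3."), ("m4.", "m5."), ("c4.", "c5."), ("r4.", "r5.")]

-- A's for-loop over mapping.items() with early return
def gngeLoop : List (String × String) → String → String
  | [], instance_type => instance_type
  | (old, new) :: rest, instance_type =>
      if PySem.Str.startswith instance_type old then PySem.Str.replace instance_type old new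
      else gngeLoop rest instance_type

def get_new_generation_equivalent (instance_type : String) : String :=
  gngeLoop gngeMapping instance_type

-- ===== PORT B =====
-- 'f in "mcr"' is the char-in-string membership test, i.e. f = 'm' ∨ f = 'c' ∨ f = 'r';
-- chr(ord(g)+1) is Char.ofNat (g.toNat + 1) (exact here: g is the ASCII digit '2' or '4')
def get_new_generation_equivalent_alt (instance_type : String) : String :=
  if PySem.Str.len instance_type ≥ 3 ∧ PySem.Str.pyGet? instance_type 2 = some '.' then
    match PySem.Str.pyGet? instance_type 0, PySem.Str.pyGet? instance_type 1 with
    | some f, some g =>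
      if (f = 't' ∧ g = '2') ∨ ((f = 'm' ∨ f = 'c' ∨ f = 'r') ∧ g = '4') then
        PySem.Str.replace instance_type (String.ofList [f, g, '.'])
          (String.ofList [f, Char.ofNat (g.toNat + 1), '.'])
      else instance_type
    | _, _ => instance_type
  else instance_type

-- ===== PRECONDITION & SPEC =====
def Spec_get_new_generation_equivalent (instance_type : String) (out : String) : Prop := out = get_new_generation_equivalent_alt instance_type
instance (instance_type : String) (out : String) : Decidable (Spec_get_new_generation_equivalent instance_type out) := by unfold Spec_get_new_generation_equivalent; infer_instance

-- ===== CLAIM (what is proved, stated in full; the proofs are below) =====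
def Claim_equal_get_new_generation_equivalent : Prop := ∀ (instance_type : String), Dom_get_new_generation_equivalent instance_type → Spec_get_new_generation_equivalent instance_type (get_new_generation_equivalent instance_type)

-- ===== LEMMAS AND PROOFS =====

-- startswith on a list of length ≥ 3 against a 3-char pattern is three char equations
theorem gnge_startswith3 (l : List Char) (x y z a b c : Char) (rest : List Char)
    (hl : l = a :: b :: c :: rest) :
    (PySem.Chars.startswith l [x, y, z] = true) ↔ (a = x ∧ b = y ∧ c = z) := by
  subst hl
  simp [PySem.Chars.startswith, List.isPrefixOf]
  constructor <;> rintro ⟨h1, h2, h3⟩ <;> exact ⟨h1.symm, h2.symm, h3.symm⟩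

-- s[i] for i = 0,1,2 on a list with at least three elements
theorem gnge_get0 (a b c : Char) (rest : List Char) :
    PySem.List.pyGet? (a :: b :: c :: rest) 0 = some a := by
  simp only [PySem.List.pyGet?, PySem.List.pyIdx?, List.length_cons]
  split
  · split
    · simp
    · exfalso; omega
  · exfalso; omega

theorem gnge_get1 (a b c : Char) (rest : List Char) :
    PySem.List.pyGet? (a :: b :: c :: rest) 1 = some b := by
  simp only [PySem.List.pyGet?, PySem.List.pyIdx?, List.length_cons]
  split
  · split
    · simp
    · exfalso; omega
  · exfalso; omega

theorem gnge_get2 (a b c : Char) (rest : List Char) :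
    PySem.List.pyGet? (a :: b :: c :: rest) 2 = some c := by
  simp only [PySem.List.pyGet?, PySem.List.pyIdx?, List.length_cons]
  split
  · split
    · simp
    · exfalso; omega
  · exfalso; omega

-- ===== VERDICT (by name: the statement is the Claim_ definition above) =====
theorem get_new_generation_equivalent_spec : Claim_equal_get_new_generation_equivalent := by
  intro s _
  unfold Spec_get_new_generation_equivalent get_new_generation_equivalent
    get_new_generation_equivalent_alt
  simp only [gngeMapping, gngeLoop, PySem.Str.startswith_eq, PySem.Str.len_eq,
    PySem.Str.pyGet?_eq, PySem.Chars.pyGet?_eq_listPyGet?]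
  rcases hl : s.toList with _ | ⟨a, _ | ⟨b, _ | ⟨c, rest⟩⟩⟩
  · simp [PySem.Chars.startswith, PySem.List.pyGet?, PySem.List.pyIdx?]
  · simp [PySem.Chars.startswith, List.isPrefixOf, PySem.List.pyGet?, PySem.List.pyIdx?]
  · simp [PySem.Chars.startswith, List.isPrefixOf, PySem.List.pyGet?, PySem.List.pyIdx?]
  · simp only [gnge_get0, gnge_get1, gnge_get2]
    rw [show ("t2." : String).toList = ['t','2','.'] from rfl,
        show ("m4." : String).toList = ['m','4','.'] from rfl,
        show ("c4." : String).toList = ['c','4','.'] from rfl,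
        show ("r4." : String).toList = ['r','4','.'] from rfl]
    have len3 : (3:Int) ≤ ((a :: b :: c :: rest).length : Int) := by simp; omega
    by_cases hc : c = '.'
    · subst hc
      by_cases h1 : a = 't' ∧ b = '2'
      · obtain ⟨ha, hb⟩ := h1; subst ha; subst hb
        rw [if_pos ((gnge_startswith3 _ _ _ _ _ _ _ _ rfl).mpr ⟨rfl, rfl, rfl⟩),
            if_pos ⟨len3, rfl⟩, if_pos (Or.inl ⟨rfl, rfl⟩)]
        rfl
      · by_cases h2 : a = 'm' ∧ b = '4'
        · obtain ⟨ha, hb⟩ := h2; subst ha; subst hb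
          rw [if_neg (by rw [gnge_startswith3 _ _ _ _ _ _ _ _ rfl]; decide),
              if_pos ((gnge_startswith3 _ _ _ _ _ _ _ _ rfl).mpr ⟨rfl, rfl, rfl⟩),
              if_pos ⟨len3, rfl⟩, if_pos (Or.inr ⟨Or.inl rfl, rfl⟩)]
          rfl
        · by_cases h3 : a = 'c' ∧ b = '4'
          · obtain ⟨ha, hb⟩ := h3; subst ha; subst hb
            rw [if_neg (by rw [gnge_startswith3 _ _ _ _ _ _ _ _ rfl]; decide),
                if_neg (by rw [gnge_startswith3 _ _ _ _ _ _ _ _ rfl]; decide),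
                if_pos ((gnge_startswith3 _ _ _ _ _ _ _ _ rfl).mpr ⟨rfl, rfl, rfl⟩),
                if_pos ⟨len3, rfl⟩, if_pos (Or.inr ⟨Or.inr (Or.inl rfl), rfl⟩)]
            rfl
          · by_cases h4 : a = 'r' ∧ b = '4'
            · obtain ⟨ha, hb⟩ := h4; subst ha; subst hb
              rw [if_neg (by rw [gnge_startswith3 _ _ _ _ _ _ _ _ rfl]; decide),
                  if_neg (by rw [gnge_startswith3 _ _ _ _ _ _ _ _ rfl]; decide),
                  if_neg (by rw [gnge_startswith3 _ _ _ _ _ _ _ _ rfl]; decide),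
                  if_pos ((gnge_startswith3 _ _ _ _ _ _ _ _ rfl).mpr ⟨rfl, rfl, rfl⟩),
                  if_pos ⟨len3, rfl⟩, if_pos (Or.inr ⟨Or.inr (Or.inr rfl), rfl⟩)]
              rfl
            · rw [if_neg (by rw [gnge_startswith3 _ _ _ _ _ _ _ _ rfl]; rintro ⟨x, y, -⟩; exact h1 ⟨x, y⟩),
                  if_neg (by rw [gnge_startswith3 _ _ _ _ _ _ _ _ rfl]; rintro ⟨x, y, -⟩; exact h2 ⟨x, y⟩),
                  if_neg (by rw [gnge_startswith3 _ _ _ _ _ _ _ _ rfl]; rintro ⟨x, y, -⟩; exact h3 ⟨x, y⟩),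
                  if_neg (by rw [gnge_startswith3 _ _ _ _ _ _ _ _ rfl]; rintro ⟨x, y, -⟩; exact h4 ⟨x, y⟩),
                  if_pos ⟨len3, rfl⟩,
                  if_neg (by
                    rintro (⟨x, y⟩ | ⟨x | x | x, y⟩)
                    exacts [h1 ⟨x, y⟩, h2 ⟨x, y⟩, h3 ⟨x, y⟩, h4 ⟨x, y⟩])]
    · rw [if_neg (by rw [gnge_startswith3 _ _ _ _ _ _ _ _ rfl]; rintro ⟨-, -, x⟩; exact hc x),
          if_neg (by rw [gnge_startswith3 _ _ _ _ _ _ _ _ rfl]; rintro ⟨-, -, x⟩; exact hc x),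
          if_neg (by rw [gnge_startswith3 _ _ _ _ _ _ _ _ rfl]; rintro ⟨-, -, x⟩; exact hc x),
          if_neg (by rw [gnge_startswith3 _ _ _ _ _ _ _ _ rfl]; rintro ⟨-, -, x⟩; exact hc x),
          if_neg (by rintro ⟨-, x⟩; exact hc (Option.some_injective _ x))]
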